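-- pv_equiv track=rewrite | github.com/author-spirit/scratchpad-algo | Binary/FindMissing.py | two_loop
-- ===== SOURCE A (Python) =====
-- def two_loop(n,series):
--     k = 0
--
--     for i in range(n):
--         k = i
--         for j in range(len(series)):
--             if series[j] == i:
--                 k=0
--                 break
--
--         if k > 0:
--             break
--
--     return k
-- ===== SOURCE B (Python) =====
-- def two_loop(n, series):
--     present = set(series)
--     # the smallest missing positive is at most len(present) + 1 (pigeonhole),
--     # so the candidate range never needs to extend past that
--     missing = set(range(1, min(n, len(present) + 2))) - present
--     return min(missing) if missing else 0
-- ===== Notes on version B (the rewrite author's own statement) =====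
-- stated objective: simpler
-- what changed: A's ordered scan over range(n) with an early break and an inner index-by-index membership loop is replaced by a whole-set construction: missing = set(range(1, min(n, len(set(series))+2))) - set(series), returning min(missing) or 0 (the pigeonhole bound keeps the candidate range small).
import Mathlib
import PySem

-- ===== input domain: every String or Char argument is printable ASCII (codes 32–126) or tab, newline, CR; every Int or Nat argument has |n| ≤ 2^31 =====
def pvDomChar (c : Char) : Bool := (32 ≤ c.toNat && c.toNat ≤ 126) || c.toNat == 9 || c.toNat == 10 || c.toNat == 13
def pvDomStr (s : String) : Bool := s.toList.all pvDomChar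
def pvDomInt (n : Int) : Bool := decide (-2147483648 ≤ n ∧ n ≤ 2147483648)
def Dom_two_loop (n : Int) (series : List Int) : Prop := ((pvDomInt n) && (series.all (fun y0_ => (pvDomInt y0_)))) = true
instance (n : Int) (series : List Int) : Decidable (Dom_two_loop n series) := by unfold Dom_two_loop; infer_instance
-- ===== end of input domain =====

-- B replaces A's ordered scan-with-break (with an inner O(len) membership loop) by a
-- set difference set(range(1,n)) - set(series) followed by a single min reduction (objective: simpler).

-- ===== PORT A =====
-- inner 'for j in range(len(series)): if series[j] == i: k = 0; break'
def twoLoopInner (series : List Int) (i : Int) : List Int → Int → Int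
  | [], k => k
  | j :: rest, k =>
      if PySem.List.pyGetD series j 0 = i then 0
      else twoLoopInner series i rest k

-- outer 'for i in range(n): k = i; <inner>; if k > 0: break'
def twoLoopOuter (series : List Int) : List Int → Int → Int
  | [], k => k
  | i :: rest, _ =>
      let k := twoLoopInner series i (PySem.List.pyRange 0 (PySem.List.len series) 1) i
      if k > 0 then k else twoLoopOuter series rest k

def two_loop (n : Int) (series : List Int) : Int :=
  twoLoopOuter series (PySem.List.pyRange 0 n 1) 0

-- ===== PORT B =====
def two_loop_alt (n : Int) (series : List Int) : Int :=
  let present : PySem.Set Int := PySem.Set.ofList series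
  let missing : PySem.Set Int :=
    PySem.Set.diff (PySem.Set.ofList (PySem.List.pyRange 1 (min n (PySem.Set.len present + 2)) 1)) present
  match PySem.List.min? missing (fun x => x) with
  | some m => m
  | none => 0

-- ===== PRECONDITION & SPEC =====
def Spec_two_loop (n : Int) (series : List Int) (out : Int) : Prop := out = two_loop_alt n series
instance (n : Int) (series : List Int) (out : Int) : Decidable (Spec_two_loop n series out) := by unfold Spec_two_loop; infer_instance

-- ===== CLAIM (what is proved, stated in full; the proofs are below) =====
def Claim_equal_two_loop : Prop := ∀ (n : Int) (series : List Int), Dom_two_loop n series → Spec_two_loop n series (two_loop n series)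

-- ===== LEMMAS AND PROOFS =====

-- the inner loop returns 0 iff some scanned index hits i, else the incoming k
theorem twoLoopInner_char (series : List Int) (i : Int) (js : List Int) (k : Int) :
    twoLoopInner series i js k =
      if ∃ j ∈ js, PySem.List.pyGetD series j 0 = i then 0 else k := by
  induction js with
  | nil => simp [twoLoopInner]
  | cons j rest ih =>
      simp only [twoLoopInner, ih]
      by_cases h : PySem.List.pyGetD series j 0 = i <;> simp [h]

-- scanning all indices of series is membership in series
theorem twoLoopInner_mem (series : List Int) (i : Int) (k : Int) :
    twoLoopInner series i (PySem.List.pyRange 0 (PySem.List.len series) 1) k =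
      if i ∈ series then 0 else k := by
  rw [twoLoopInner_char]
  congr 1
  have hmap := PySem.List.map_pyGetD_pyRange_zero series 0
  simp only [eq_iff_iff]
  constructor
  · rintro ⟨j, hj, hji⟩
    rw [← hmap]; exact hji ▸ List.mem_map_of_mem hj
  · intro hi
    rw [← hmap] at hi
    obtain ⟨j, hj, hji⟩ := List.mem_map.mp hi
    exact ⟨j, hj, hji⟩

-- the outer loop over range(a, b) with a ≥ 1 and k = 0 returns the first missing value
theorem twoLoopOuter_char (series : List Int) (a b : Int) (ha : 1 ≤ a) :
    twoLoopOuter series (PySem.List.pyRange a b 1) 0 =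
      ((PySem.List.pyRange a b 1).filter (fun i => !series.contains i)).headD 0 := by
  by_cases hab : b ≤ a
  · rw [PySem.List.pyRange_one_eq_nil hab]; rfl
  · push Not at hab
    have : (b - (a+1)).toNat < (b - a).toNat := by omega
    rw [PySem.List.pyRange_one_cons hab]
    simp only [twoLoopOuter, twoLoopInner_mem]
    by_cases hm : a ∈ series
    · simp only [hm, if_true, List.filter_cons]
      have : series.contains a = true := List.elem_eq_true_of_mem hm
      simp only [this, Bool.not_true]
      rw [twoLoopOuter_char series (a+1) b (by omega)]
      simp
    · have hc : series.contains a = false := by simpa using hm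
      simp only [hm, if_false, List.filter_cons, hc]
      rw [if_pos (by omega)]
      simp
termination_by (b - a).toNat

-- pigeonhole: among 1 .. |set(series)|+1 some value is missing from series
theorem filter_missing_ne_nil (series : List Int) :
    (PySem.List.pyRange 1 (((PySem.Set.ofList series).length : Int) + 2) 1).filter
      (fun i => !series.contains i) ≠ [] := by
  intro hnil
  have hsub : PySem.List.pyRange 1 (((PySem.Set.ofList series).length : Int) + 2) 1 ⊆
      PySem.Set.ofList series := by
    intro a ha
    have := List.filter_eq_nil_iff.mp hnil a ha
    rw [PySem.Set.mem_ofList]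
    simpa using this
  have hlen := (List.subperm_of_subset (PySem.List.nodup_pyRange_one _ _) hsub).length_le
  rw [PySem.List.length_pyRange_one] at hlen
  omega

-- truncating the candidate range at |set(series)|+2 does not change the first missing value
theorem headD_filter_trunc (series : List Int) (n : Int) :
    ((PySem.List.pyRange 1 n 1).filter (fun i => !series.contains i)).headD 0 =
    ((PySem.List.pyRange 1 (min n (((PySem.Set.ofList series).length : Int) + 2)) 1).filter
      (fun i => !series.contains i)).headD 0 := by
  by_cases h : n ≤ ((PySem.Set.ofList series).length : Int) + 2
  · rw [min_eq_left h]
  · push Not at h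
    rw [min_eq_right h.le,
        PySem.List.pyRange_one_append 1 (((PySem.Set.ofList series).length : Int) + 2) n
          (by omega) h.le,
        List.filter_append]
    cases hf : (PySem.List.pyRange 1 (((PySem.Set.ofList series).length : Int) + 2) 1).filter
        (fun i => !series.contains i) with
    | nil => exact absurd hf (filter_missing_ne_nil series)
    | cons a t => simp

-- min (if nonempty, else 0) of a strictly sorted list is its head
theorem min_head (l : List Int) (hl : l.Pairwise (· < ·)) :
    (match PySem.List.min? l (fun x => x) with
      | some m => m
      | none => 0) = l.headD 0 := by
  cases l with
  | nil => rfl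
  | cons x t =>
      rw [PySem.List.min?_id_cons]
      simp only [List.headD_cons]
      rcases PySem.List.foldl_min_mem t x with h | h
      · exact h
      · exfalso
        have h1 : x < t.foldl min x := (List.pairwise_cons.mp hl).1 _ h
        have h2 : t.foldl min x ≤ x := (PySem.List.foldl_min_le t x).1
        omega

-- ===== VERDICT (by name: the statement is the Claim_ definition above) =====
theorem two_loop_spec : Claim_equal_two_loop := by
  intro n series _
  unfold Spec_two_loop two_loop two_loop_alt
  -- A side
  have ha : twoLoopOuter series (PySem.List.pyRange 0 n 1) 0 =
      ((PySem.List.pyRange 1 n 1).filter (fun i => !series.contains i)).headD 0 := by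
    by_cases h0 : 0 < n
    · rw [PySem.List.pyRange_one_cons h0]
      simp only [twoLoopOuter, twoLoopInner_mem]
      have : (if (0:Int) ∈ series then (0:Int) else 0) = 0 := by split <;> rfl
      rw [this]
      rw [if_neg (by omega)]
      rw [zero_add]
      exact twoLoopOuter_char series 1 n (le_refl 1)
    · rw [PySem.List.pyRange_one_eq_nil (by omega), PySem.List.pyRange_one_eq_nil (by omega)]
      rfl
  rw [ha, headD_filter_trunc series n]
  -- B side
  simp only [PySem.Set.len]
  set m : Int := min n (((PySem.Set.ofList series).length : Int) + 2) with hm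
  have hof : PySem.Set.ofList (PySem.List.pyRange 1 m 1) = PySem.List.pyRange 1 m 1 :=
    PySem.Set.ofList_eq_self_of_nodup _ (PySem.List.nodup_pyRange_one 1 m)
  simp only [PySem.Set.diff, hof]
  have hpair : ((PySem.List.pyRange 1 m 1).filter
      (fun x => !(PySem.Set.ofList series).contains x)).Pairwise (· < ·) :=
    (PySem.List.pairwise_lt_pyRange_one 1 m).filter _
  rw [min_head _ hpair]
  congr 2
  funext x
  have : (PySem.Set.ofList series).contains x = series.contains x := by
    rcases Bool.eq_false_or_eq_true (series.contains x) with h | h <;>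
      simp_all [PySem.Set.mem_ofList]
  rw [this]
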